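-- pv_equiv track=rewrite | github.com/DjiemoRihanna/Acra | src/ingestion/zeek_stream.py | classify_by_port_service
-- ===== SOURCE A (Python) =====
-- from typing import Optional, Dict, Any, List, Tuple
--
-- class ZeekConfig:
--     """Configuration centralisée du streamer Zeek"""
--
--     # Chemins des logs
--     LOG_DIR = "/app/data/zeek_logs/"
--     LOG_FILES = {
--         'conn': "conn.log",
--         'ssl': "ssl.log",
--         'dns': "dns.log",
--         'http': "http.log",
--         'files': "files.log"
--     }
--
--     # Réseaux privés
--     PRIVATE_NETWORKS = (
--         '192.168.', '10.', '172.16.', '172.17.', '172.18.', '172.19.',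
--         '172.2', '172.30.', '172.31.', '127.'
--     )
--
--     # Classification des ports
--     PORTS = {
--         'ROUTER': {53, 67, 68, 161, 162, 123},  # DNS, DHCP, SNMP, NTP
--         'SERVER': {22, 21, 25, 80, 443, 3306, 5432, 27017, 6379, 9200, 11211},
--         'PRINTER': {9100, 515, 631, 443},
--         'IOT': {5353, 1900, 5683, 8883, 1883},  # mDNS, UPnP, CoAP, MQTT
--         'CAMERA': {554, 37777, 8000, 8080},  # RTSP, Dahua, streaming
--         'VOIP': {5060, 5061, 10000, 20000},  # SIP, RTP
--         'ICS': {502, 44818, 1911, 1962},  # Modbus, EtherNet/IP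
--     }
--
--     # Services connus
--     SERVICES = {
--         'ROUTER': {'dns', 'dhcp', 'ntp', 'snmp'},
--         'SERVER': {'ssh', 'http', 'https', 'mysql', 'postgresql', 'redis', 'elasticsearch'},
--         'DATABASE': {'mysql', 'postgresql', 'redis', 'mongodb', 'cassandra'},
--         'IOT': {'mdns', 'upnp', 'coap', 'mqtt'},
--     }
--
--     # Config DB
--     DB_CONNECT_TIMEOUT = 10
--     DB_RETRY_ATTEMPTS = 10
--     DB_RETRY_DELAY = 2
--
-- def classify_by_port_service(port: int, service: str) -> Optional[str]:
--     """Classification basée sur le port et le service"""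
--     service_lower = service.lower() if service else ''
--
--     # Vérification par port
--     for device_type, ports in ZeekConfig.PORTS.items():
--         if port in ports:
--             return device_type.lower()
--
--     # Vérification par service
--     for device_type, services in ZeekConfig.SERVICES.items():
--         if service_lower in services:
--             return device_type.lower()
--
--     return None
-- ===== SOURCE B (Python) =====
-- from typing import Optional
--
-- # Same configuration data as the original module (category -> keys, in order).
-- _PORTS = {
--     'ROUTER': {53, 67, 68, 161, 162, 123},
--     'SERVER': {22, 21, 25, 80, 443, 3306, 5432, 27017, 6379, 9200, 11211},
--     'PRINTER': {9100, 515, 631, 443},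
--     'IOT': {5353, 1900, 5683, 8883, 1883},
--     'CAMERA': {554, 37777, 8000, 8080},
--     'VOIP': {5060, 5061, 10000, 20000},
--     'ICS': {502, 44818, 1911, 1962},
-- }
--
-- _SERVICES = {
--     'ROUTER': {'dns', 'dhcp', 'ntp', 'snmp'},
--     'SERVER': {'ssh', 'http', 'https', 'mysql', 'postgresql', 'redis', 'elasticsearch'},
--     'DATABASE': {'mysql', 'postgresql', 'redis', 'mongodb', 'cassandra'},
--     'IOT': {'mdns', 'upnp', 'coap', 'mqtt'},
-- }
--
--
-- def _build_reverse(table):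
--     """Flat reverse lookup: key -> lowercased category; first-listed category wins."""
--     rev = {}
--     for device_type, keys in table.items():
--         for k in keys:
--             rev.setdefault(k, device_type.lower())
--     return rev
--
--
-- _PORT_TO_TYPE = _build_reverse(_PORTS)
-- _SERVICE_TO_TYPE = _build_reverse(_SERVICES)
--
--
-- def classify_by_port_service(port: int, service: str) -> Optional[str]:
--     service_lower = service.lower() if service else ''
--     r = _PORT_TO_TYPE.get(port)
--     if r is not None:
--         return r
--     return _SERVICE_TO_TYPE.get(service_lower)
-- ===== Notes on version B (the rewrite author's own statement) =====
-- stated objective: idiomatic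
-- what changed: Replaces the two category-scanning loops run on every call by two flat reverse-lookup dicts (port->type, service->type) built once with setdefault so the first-listed category wins on overlaps; each call is then two dict lookups.
import Mathlib
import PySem

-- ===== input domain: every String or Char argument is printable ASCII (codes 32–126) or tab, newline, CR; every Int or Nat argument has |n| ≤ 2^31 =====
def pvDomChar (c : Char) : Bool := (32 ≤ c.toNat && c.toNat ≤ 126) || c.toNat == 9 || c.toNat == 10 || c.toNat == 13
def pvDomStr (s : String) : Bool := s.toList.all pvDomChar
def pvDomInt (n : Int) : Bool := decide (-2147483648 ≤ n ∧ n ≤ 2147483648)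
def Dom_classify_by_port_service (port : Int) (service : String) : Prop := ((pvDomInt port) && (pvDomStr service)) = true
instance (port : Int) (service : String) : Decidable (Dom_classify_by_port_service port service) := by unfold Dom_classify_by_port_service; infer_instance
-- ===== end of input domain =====

-- B replaces A's per-call scans over the category tables by two flat reverse-lookup
-- dicts built once (setdefault: first-listed category wins), then two lookups per call.

-- Shared configuration data (ZeekConfig.PORTS / SERVICES as ordered category lists;
-- the Python sets are listed with their distinct elements).
def zeekPorts : List (String × List Int) :=
  [("ROUTER", [53, 67, 68, 161, 162, 123]),
   ("SERVER", [22, 21, 25, 80, 443, 3306, 5432, 27017, 6379, 9200, 11211]),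
   ("PRINTER", [9100, 515, 631, 443]),
   ("IOT", [5353, 1900, 5683, 8883, 1883]),
   ("CAMERA", [554, 37777, 8000, 8080]),
   ("VOIP", [5060, 5061, 10000, 20000]),
   ("ICS", [502, 44818, 1911, 1962])]

def zeekServices : List (String × List String) :=
  [("ROUTER", ["dns", "dhcp", "ntp", "snmp"]),
   ("SERVER", ["ssh", "http", "https", "mysql", "postgresql", "redis", "elasticsearch"]),
   ("DATABASE", ["mysql", "postgresql", "redis", "mongodb", "cassandra"]),
   ("IOT", ["mdns", "upnp", "coap", "mqtt"])]

-- ===== PORT A =====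
-- A's loop: for device_type, keys in table.items(): if x in keys: return device_type.lower()
def scanTable {κ : Type} [BEq κ] (cats : List (String × List κ)) (x : κ) : Option String :=
  match cats with
  | [] => none
  | (t, ks) :: rest => if ks.contains x then some (PySem.Str.lower t) else scanTable rest x

def classify_by_port_service (port : Int) (service : String) : Option String :=
  let service_lower := if service ≠ "" then PySem.Str.lower service else ""
  match scanTable zeekPorts port with
  | some t => some t
  | none =>
    match scanTable zeekServices service_lower with
    | some t => some t
    | none => none

-- ===== PORT B =====
-- _build_reverse: rev = {}; for device_type, keys: for k in keys: rev.setdefault(k, device_type.lower())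
def buildReverse {κ : Type} [BEq κ] (cats : List (String × List κ)) : PySem.Dict κ String :=
  cats.foldl (fun rev tc =>
    tc.2.foldl (fun rev k => rev.setdefault k (PySem.Str.lower tc.1)) rev) PySem.Dict.empty

def portToType : PySem.Dict Int String := buildReverse zeekPorts
def serviceToType : PySem.Dict String String := buildReverse zeekServices

def classify_by_port_service_alt (port : Int) (service : String) : Option String :=
  let service_lower := if service ≠ "" then PySem.Str.lower service else ""
  match portToType.get? port with
  | some r => some r
  | none => serviceToType.get? service_lower

-- ===== PRECONDITION & SPEC =====
def Spec_classify_by_port_service (port : Int) (service : String) (out : Option String) : Prop := out = classify_by_port_service_alt port service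
instance (port : Int) (service : String) (out : Option String) : Decidable (Spec_classify_by_port_service port service out) := by unfold Spec_classify_by_port_service; infer_instance

-- ===== CLAIM (what is proved, stated in full; the proofs are below) =====
def Claim_equal_classify_by_port_service : Prop := ∀ (port : Int) (service : String), Dom_classify_by_port_service port service → Spec_classify_by_port_service port service (classify_by_port_service port service)

-- ===== LEMMAS AND PROOFS =====

-- setdefault over a list of keys with one value: existing entries win, new keys get v.
theorem get?_fold_setdefault {κ : Type} [BEq κ] [LawfulBEq κ]
    (ks : List κ) (v : String) (d : PySem.Dict κ String) (x : κ) :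
    (ks.foldl (fun rev k => rev.setdefault k v) d).get? x
      = (d.get? x).or (if ks.contains x then some v else none) := by
  induction ks generalizing d with
  | nil => simp [List.foldl]
  | cons k ks ih =>
    simp only [List.foldl_cons]
    rw [ih]
    by_cases hx : x = k
    · subst hx
      rw [PySem.Dict.get?_setdefault_self d x v]
      cases h : d.get? x <;> simp [h]
    · rw [PySem.Dict.get?_setdefault_of_ne d v hx]
      simp [List.contains_cons, hx, Ne.symm hx]

-- the reverse dict's lookup is exactly A's first-match category scan.
theorem get?_buildReverse_aux {κ : Type} [BEq κ] [LawfulBEq κ]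
    (cats : List (String × List κ)) (d : PySem.Dict κ String) (x : κ) :
    (cats.foldl (fun rev tc =>
        tc.2.foldl (fun rev k => rev.setdefault k (PySem.Str.lower tc.1)) rev) d).get? x
      = (d.get? x).or (scanTable cats x) := by
  induction cats generalizing d with
  | nil => simp [List.foldl, scanTable]
  | cons tc cats ih =>
    simp only [List.foldl_cons]
    rw [ih, get?_fold_setdefault]
    obtain ⟨t, ks⟩ := tc
    simp only [scanTable, Option.or_assoc]
    split <;> simp

theorem get?_buildReverse {κ : Type} [BEq κ] [LawfulBEq κ]
    (cats : List (String × List κ)) (x : κ) :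
    (buildReverse cats).get? x = scanTable cats x := by
  unfold buildReverse
  rw [get?_buildReverse_aux]
  simp [PySem.Dict.get?_empty]

-- ===== VERDICT (by name: the statement is the Claim_ definition above) =====
theorem classify_by_port_service_spec : Claim_equal_classify_by_port_service := by
  intro port service _
  unfold Spec_classify_by_port_service classify_by_port_service classify_by_port_service_alt
  simp only [portToType, serviceToType, get?_buildReverse]
  cases scanTable zeekPorts port <;>
    cases scanTable zeekServices (if service ≠ "" then PySem.Str.lower service else "") <;> rfl
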